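-- pv_equiv track=rewrite | github.com/heullvers/tcc | coleta_dados/functions.py | verifica_placares_momentaneos
-- ===== SOURCE A (Python) =====
-- def verifica_placares_momentaneos(minutos_expulsoes, minutos_gols_time_a, minutos_gols_time_b):
--     placar_no_momento_da_expulsao = []
--     for minuto_expulsao in minutos_expulsoes:
--         gols_time_a = 0
--         gols_time_b = 0
--         for minuto_gol in minutos_gols_time_a:
--             if(minuto_expulsao >= minuto_gol):
--                 gols_time_a += 1
--         for minuto_gol in minutos_gols_time_b:
--             if(minuto_expulsao >= minuto_gol):
--                 gols_time_b += 1
--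
--         placar_no_momento = str(gols_time_a) + '-' + str(gols_time_b)
--         placar_no_momento_da_expulsao.append(placar_no_momento)
--
--     for i in range(8- len(placar_no_momento_da_expulsao)):
--         placar_no_momento_da_expulsao.append(None)
--
--     return placar_no_momento_da_expulsao
-- ===== SOURCE B (Python) =====
-- def _conta_gols_ate(gols_ordenados, minuto):
--     # binary search: number of goals with minute <= minuto in a sorted list
--     lo, hi = 0, len(gols_ordenados)
--     while lo < hi:
--         mid = (lo + hi) // 2
--         if gols_ordenados[mid] <= minuto:
--             lo = mid + 1
--         else:
--             hi = mid
--     return lo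
--
--
-- def verifica_placares_momentaneos(minutos_expulsoes, minutos_gols_time_a, minutos_gols_time_b):
--     gols_a = sorted(minutos_gols_time_a)
--     gols_b = sorted(minutos_gols_time_b)
--     placares = [str(_conta_gols_ate(gols_a, m)) + '-' + str(_conta_gols_ate(gols_b, m))
--                 for m in minutos_expulsoes]
--     return placares + [None] * (8 - len(placares))
-- ===== Notes on version B (the rewrite author's own statement) =====
-- stated objective: faster
-- what changed: Instead of rescanning both full goal lists for every expulsion, B sorts each goal list once and counts goals up to each expulsion minute with a hand-written binary search, then pads with [None]*(8-len) instead of a range loop.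
import Mathlib
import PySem

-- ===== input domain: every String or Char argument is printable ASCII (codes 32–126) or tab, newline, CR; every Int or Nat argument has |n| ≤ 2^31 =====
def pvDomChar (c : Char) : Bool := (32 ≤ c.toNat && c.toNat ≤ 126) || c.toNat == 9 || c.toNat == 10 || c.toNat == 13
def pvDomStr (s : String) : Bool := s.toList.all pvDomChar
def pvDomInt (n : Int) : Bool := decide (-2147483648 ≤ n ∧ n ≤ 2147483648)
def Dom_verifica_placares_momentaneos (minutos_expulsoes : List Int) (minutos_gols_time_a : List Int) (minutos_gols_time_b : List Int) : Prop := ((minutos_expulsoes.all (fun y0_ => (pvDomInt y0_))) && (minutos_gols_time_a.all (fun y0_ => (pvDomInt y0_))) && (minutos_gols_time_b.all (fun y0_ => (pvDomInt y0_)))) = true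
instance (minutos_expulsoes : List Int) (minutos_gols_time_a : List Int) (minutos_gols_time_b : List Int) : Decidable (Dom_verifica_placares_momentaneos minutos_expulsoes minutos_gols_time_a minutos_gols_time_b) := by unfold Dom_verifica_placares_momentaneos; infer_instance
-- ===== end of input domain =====

-- B replaces A's rescan of both full goal lists per expulsion by sorting each goal
-- list once and counting with a binary search per expulsion (objective: faster).

-- ===== PORT A =====
def verifica_placares_momentaneos (minutos_expulsoes : List Int) (minutos_gols_time_a : List Int) (minutos_gols_time_b : List Int) : List (Option String) :=
  -- for minuto_expulsao in minutos_expulsoes: count both teams' goals, append "a-b"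
  let placar := minutos_expulsoes.foldl (fun acc minuto_expulsao =>
    let gols_time_a := minutos_gols_time_a.foldl
      (fun c minuto_gol => if minuto_expulsao ≥ minuto_gol then c + 1 else c) (0 : Int)
    let gols_time_b := minutos_gols_time_b.foldl
      (fun c minuto_gol => if minuto_expulsao ≥ minuto_gol then c + 1 else c) (0 : Int)
    acc ++ [some (PySem.Int.toStr gols_time_a ++ "-" ++ PySem.Int.toStr gols_time_b)]) []
  -- for i in range(8 - len(...)): append None
  placar ++ (PySem.List.pyRange 0 (8 - (placar.length : Int)) 1).foldl
    (fun acc _ => acc ++ [(none : Option String)]) []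

-- ===== PORT B =====
-- hand-written binary search from Source B: number of sorted elements ≤ minuto
def contaGolsAte (gols_ordenados : List Int) (minuto : Int) (lo hi : Nat) : Nat :=
  if _h : lo < hi then
    let mid := (lo + hi) / 2
    if gols_ordenados.getD mid 0 ≤ minuto then contaGolsAte gols_ordenados minuto (mid + 1) hi
    else contaGolsAte gols_ordenados minuto lo mid
  else lo
termination_by hi - lo
decreasing_by all_goals omega

def verifica_placares_momentaneos_alt (minutos_expulsoes : List Int) (minutos_gols_time_a : List Int) (minutos_gols_time_b : List Int) : List (Option String) :=
  let gols_a := PySem.List.sorted minutos_gols_time_a (fun x => x) false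
  let gols_b := PySem.List.sorted minutos_gols_time_b (fun x => x) false
  let placares := minutos_expulsoes.map (fun m =>
    PySem.Int.toStr ((contaGolsAte gols_a m 0 gols_a.length : Nat) : Int) ++ "-" ++
    PySem.Int.toStr ((contaGolsAte gols_b m 0 gols_b.length : Nat) : Int))
  placares.map some ++ List.replicate (8 - placares.length) (none : Option String)

-- ===== PRECONDITION & SPEC =====
def Spec_verifica_placares_momentaneos (minutos_expulsoes : List Int) (minutos_gols_time_a : List Int) (minutos_gols_time_b : List Int) (out : List (Option String)) : Prop := out = verifica_placares_momentaneos_alt minutos_expulsoes minutos_gols_time_a minutos_gols_time_b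
instance (minutos_expulsoes : List Int) (minutos_gols_time_a : List Int) (minutos_gols_time_b : List Int) (out : List (Option String)) : Decidable (Spec_verifica_placares_momentaneos minutos_expulsoes minutos_gols_time_a minutos_gols_time_b out) := by unfold Spec_verifica_placares_momentaneos; infer_instance

-- ===== CLAIM (what is proved, stated in full; the proofs are below) =====
def Claim_equal_verifica_placares_momentaneos : Prop := ∀ (minutos_expulsoes : List Int) (minutos_gols_time_a : List Int) (minutos_gols_time_b : List Int), Dom_verifica_placares_momentaneos minutos_expulsoes minutos_gols_time_a minutos_gols_time_b → Spec_verifica_placares_momentaneos minutos_expulsoes minutos_gols_time_a minutos_gols_time_b (verifica_placares_momentaneos minutos_expulsoes minutos_gols_time_a minutos_gols_time_b)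

-- ===== LEMMAS AND PROOFS =====

-- unfolding equations for the binary search
theorem contaGolsAte_step (xs : List Int) (m : Int) (lo hi : Nat) (h : lo < hi) :
    contaGolsAte xs m lo hi =
      if xs.getD ((lo + hi) / 2) 0 ≤ m then contaGolsAte xs m ((lo + hi) / 2 + 1) hi
      else contaGolsAte xs m lo ((lo + hi) / 2) := by
  rw [contaGolsAte, dif_pos h]

theorem contaGolsAte_stop (xs : List Int) (m : Int) (lo hi : Nat) (h : ¬ lo < hi) :
    contaGolsAte xs m lo hi = lo := by
  rw [contaGolsAte, dif_neg h]

-- binary search keeps its invariants and lands at the ≤/> frontier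
theorem contaGolsAte_inv (xs : List Int) (m : Int)
    (hs : List.Pairwise (fun a b => a ≤ b) xs) :
    ∀ (k lo hi : Nat), hi - lo ≤ k → hi ≤ xs.length → lo ≤ hi →
    (∀ j (hj : j < xs.length), j < lo → xs[j] ≤ m) →
    (∀ j (hj : j < xs.length), hi ≤ j → m < xs[j]) →
    contaGolsAte xs m lo hi ≤ xs.length ∧
    (∀ j (hj : j < xs.length), j < contaGolsAte xs m lo hi → xs[j] ≤ m) ∧
    (∀ j (hj : j < xs.length), contaGolsAte xs m lo hi ≤ j → m < xs[j]) := by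
  intro k
  induction k with
  | zero =>
    intro lo hi hk hhi hlh h1 h2
    rw [contaGolsAte_stop xs m lo hi (by omega)]
    exact ⟨by omega, fun j hj hjlt => h1 j hj (by omega), fun j hj hjge => h2 j hj (by omega)⟩
  | succ k ih =>
    intro lo hi hk hhi hlh h1 h2
    by_cases h : lo < hi
    · rw [contaGolsAte_step xs m lo hi h]
      have hmidlt : (lo + hi) / 2 < hi := by omega
      have hmidlo : lo ≤ (lo + hi) / 2 := by omega
      have hmidlen : (lo + hi) / 2 < xs.length := by omega
      rw [List.getD_eq_getElem?_getD, List.getElem?_eq_getElem hmidlen, Option.getD_some]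
      by_cases hle : xs[(lo + hi) / 2] ≤ m
      · rw [if_pos hle]
        refine ih ((lo + hi) / 2 + 1) hi (by omega) hhi (by omega) ?_ h2
        intro j hj hjlt
        rcases Nat.lt_or_ge j lo with hc | hc
        · exact h1 j hj hc
        · rcases Nat.lt_or_ge j ((lo + hi) / 2) with hc2 | hc2
          · exact le_trans (List.pairwise_iff_getElem.mp hs j ((lo + hi) / 2) hj hmidlen hc2) hle
          · have hj2 : j = (lo + hi) / 2 := by omega
            simp only [hj2]
            exact hle
      · rw [if_neg hle]
        refine ih lo ((lo + hi) / 2) (by omega) (by omega) hmidlo h1 ?_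
        intro j hj hjge
        rcases Nat.eq_or_lt_of_le hjge with hc | hc
        · simp only [← hc]; omega
        · exact lt_of_lt_of_le (by omega) (List.pairwise_iff_getElem.mp hs ((lo + hi) / 2) j hmidlen hj hc)
    · rw [contaGolsAte_stop xs m lo hi h]
      exact ⟨by omega, fun j hj hjlt => h1 j hj (by omega), fun j hj hjge => h2 j hj (by omega)⟩

-- a frontier position is exactly the countP of the ≤-predicate
theorem countP_of_frontier (m : Int) : ∀ (xs : List Int) (r : Nat), r ≤ xs.length →
    (∀ j (hj : j < xs.length), j < r → xs[j] ≤ m) →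
    (∀ j (hj : j < xs.length), r ≤ j → m < xs[j]) →
    xs.countP (fun g => decide (m ≥ g)) = r := by
  intro xs
  induction xs with
  | nil =>
    intro r hr _ _
    simp only [List.length_nil, Nat.le_zero] at hr
    simp [hr]
  | cons x t ih =>
    intro r hr h1 h2
    cases r with
    | zero =>
      have hx : m < x := h2 0 (by simp) (by omega)
      rw [List.countP_cons]
      simp only [decide_eq_true_eq, ge_iff_le]
      rw [if_neg (by omega)]
      rw [ih 0 (by omega) (by omega) (fun j hj _ => by
        have := h2 (j + 1) (by simp; omega) (by omega)
        simpa using this)]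
    | succ s =>
      have hx : x ≤ m := by
        have := h1 0 (by simp) (by omega); simpa using this
      have hr' : s ≤ t.length := by simp at hr; omega
      rw [List.countP_cons]
      simp only [decide_eq_true_eq, ge_iff_le]
      rw [if_pos hx]
      rw [ih s hr'
        (fun j hj hjs => by
          have := h1 (j + 1) (by simp; omega) (by omega)
          simpa using this)
        (fun j hj hjs => by
          have := h2 (j + 1) (by simp; omega) (by omega)
          simpa using this)]

-- A's linear count over a goal list equals B's binary search over its sorted copy
theorem count_eq (a : List Int) (m : Int) :
    a.foldl (fun c minuto_gol => if m ≥ minuto_gol then c + 1 else c) (0 : Int) =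
      ((contaGolsAte (PySem.List.sorted a (fun x => x) false) m 0
        (PySem.List.sorted a (fun x => x) false).length : Nat) : Int) := by
  set s := PySem.List.sorted a (fun x => x) false with hsdef
  have hpw : List.Pairwise (fun a b => a ≤ b) s := PySem.List.sorted_pairwise a (fun x => x)
  obtain ⟨hle, hfr1, hfr2⟩ := contaGolsAte_inv s m hpw s.length 0 s.length (by omega)
    (le_refl _) (by omega) (fun j hj hjlt => by omega) (fun j hj hjge => by omega)
  have hcount : s.countP (fun g => decide (m ≥ g)) = contaGolsAte s m 0 s.length :=
    countP_of_frontier m s _ hle hfr1 hfr2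
  have hperm : a.countP (fun g => decide (m ≥ g)) = s.countP (fun g => decide (m ≥ g)) :=
    (List.Perm.countP_eq _ (PySem.List.sorted_perm a (fun x => x) false)).symm
  have hfold := PySem.List.foldl_count_if (fun g => decide (m ≥ g)) a 0
  simp only [decide_eq_true_eq] at hfold
  rw [hfold, hperm, hcount]
  omega

-- A's padding over range(8 - n), once turned into a map, is replicate (8 - n) None
theorem pad_eq (n : Nat) :
    (PySem.List.pyRange 0 (8 - (n : Int)) 1).map (fun _ => (none : Option String)) =
    List.replicate (8 - n) (none : Option String) := by
  have hlen : (PySem.List.pyRange 0 (8 - (n : Int)) 1).length = ((8 : Int) - n).toNat := by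
    simp [pysem]
  rw [List.map_const']
  rw [hlen]
  congr 1
  omega

-- ===== VERDICT (by name: the statement is the Claim_ definition above) =====
theorem verifica_placares_momentaneos_spec : Claim_equal_verifica_placares_momentaneos := by
  intro e a b _
  unfold Spec_verifica_placares_momentaneos verifica_placares_momentaneos verifica_placares_momentaneos_alt
  simp only [PySem.List.foldl_append_singleton_eq_map, List.nil_append, List.map_map,
    List.length_map]
  rw [pad_eq]
  congr 1
  apply List.map_congr_left
  intro m _
  simp only [Function.comp_apply]
  rw [count_eq a m, count_eq b m]
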